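-- pv_equiv track=rewrite | github.com/monika-chauhan/DSA-With-Python | Bitwise Operator Problems/GFG Bit Manipulation Questions/First Set bit from right.py | SetBitFromRight
-- ===== SOURCE A (Python) =====
-- def SetBitFromRight(n):
--     count = 0
--     while n != 0:
--         bit = n & 1
--         count += 1
--         if bit == 1:
--             return count
--         n = n >> 1
--     return 0
-- ===== SOURCE B (Python) =====
-- def SetBitFromRight(n):
--     return (n & -n).bit_length()
-- ===== Notes on version B (the rewrite author's own statement) =====
-- stated objective: idiomatic
-- what changed: Replaced the shift-and-test loop by the closed-form bit trick: n & -n isolates the lowest set bit and its bit_length is its 1-based position (0 for n == 0).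
import Mathlib
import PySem

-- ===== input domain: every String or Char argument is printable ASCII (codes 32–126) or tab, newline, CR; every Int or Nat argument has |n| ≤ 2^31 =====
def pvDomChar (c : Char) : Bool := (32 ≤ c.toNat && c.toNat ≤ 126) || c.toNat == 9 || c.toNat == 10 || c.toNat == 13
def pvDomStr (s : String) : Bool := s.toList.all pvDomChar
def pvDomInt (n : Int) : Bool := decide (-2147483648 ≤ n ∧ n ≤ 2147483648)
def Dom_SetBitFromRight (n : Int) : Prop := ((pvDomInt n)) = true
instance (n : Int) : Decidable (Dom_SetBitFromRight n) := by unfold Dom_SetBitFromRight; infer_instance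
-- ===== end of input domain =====

-- B replaces A's shift-and-test loop by the closed-form bit expression (n & -n).bit_length().

-- ===== PORT A =====
-- termination helper for the loop: when the loop continues (n ≠ 0 and its low bit is 0), n >> 1 shrinks
theorem pvShiftLt (n : Int) (h0 : ¬ n = 0) (h1 : ¬ PySem.Int.band n 1 = 1) :
    (n >>> (1:Nat)).natAbs < n.natAbs := by
  have hm0 : 0 ≤ PySem.Int.mod n 2 := PySem.Int.mod_nonneg n (by norm_num)
  have hm2 : PySem.Int.mod n 2 < 2 := PySem.Int.mod_lt n (by norm_num)
  rw [PySem.Int.band_one] at h1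
  have hdm := PySem.Int.floordiv_mul_add_mod n 2
  have hsh : n >>> (1:Nat) = n / 2 := by
    rw [Int.shiftRight_eq_div_pow]; norm_num
  rw [hsh]
  omega

def SetBitFromRightLoop (n : Int) (count : Int) : Int :=
  if h0 : n = 0 then 0
  else
    if h1 : PySem.Int.band n 1 = 1 then count + 1
    else SetBitFromRightLoop (n >>> (1:Nat)) (count + 1)
termination_by n.natAbs
decreasing_by exact pvShiftLt n h0 h1

def SetBitFromRight (n : Int) : Int := SetBitFromRightLoop n 0

-- ===== PORT B =====
def SetBitFromRight_alt (n : Int) : Int :=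
  ((PySem.Int.bitLength (PySem.Int.band n (-n)) : Nat) : Int)

-- ===== PRECONDITION & SPEC =====
def Spec_SetBitFromRight (n : Int) (out : Int) : Prop := out = SetBitFromRight_alt n
instance (n : Int) (out : Int) : Decidable (Spec_SetBitFromRight n out) := by unfold Spec_SetBitFromRight; infer_instance

-- ===== CLAIM (what is proved, stated in full; the proofs are below) =====
def Claim_equal_SetBitFromRight : Prop := ∀ (n : Int), Dom_SetBitFromRight n → Spec_SetBitFromRight n (SetBitFromRight n)

-- ===== LEMMAS AND PROOFS =====

-- lowf m = m - (m &&& (m-1)) = value of the lowest set bit of m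
def lowf (m : Nat) : Nat := m - (m &&& (m - 1))

theorem nat_and_pred_odd (k : Nat) : (2 * k + 1) &&& (2 * k) = 2 * k := by
  apply Nat.eq_of_testBit_eq
  intro i
  rw [Nat.testBit_land]
  cases i with
  | zero => simp [Nat.testBit_zero]
  | succ i =>
      have h1 : (2 * k + 1) / 2 = k := by omega
      have h2 : (2 * k) / 2 = k := by omega
      simp only [Nat.testBit_succ]
      rw [h1, h2, Bool.and_self]

theorem nat_and_pred_even (k : Nat) (_hk : k ≠ 0) :
    (2 * k) &&& (2 * k - 1) = 2 * (k &&& (k - 1)) := by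
  apply Nat.eq_of_testBit_eq
  intro i
  rw [Nat.testBit_land]
  cases i with
  | zero => simp [Nat.testBit_zero]
  | succ i =>
      have h1 : (2 * k) / 2 = k := by omega
      have h2 : (2 * k - 1) / 2 = k - 1 := by omega
      have h3 : (2 * (k &&& (k - 1))) / 2 = k &&& (k - 1) := by omega
      simp only [Nat.testBit_succ]
      rw [h1, h2, h3, Nat.testBit_land]

theorem lowf_odd (k : Nat) : lowf (2 * k + 1) = 1 := by
  unfold lowf
  have : 2 * k + 1 - 1 = 2 * k := by omega
  rw [this, nat_and_pred_odd]
  omega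

theorem lowf_even (k : Nat) (hk : k ≠ 0) : lowf (2 * k) = 2 * lowf k := by
  unfold lowf
  rw [nat_and_pred_even k hk]
  have h := @Nat.and_le_left k (k - 1)
  omega

theorem lowf_pos (m : Nat) (hm : m ≠ 0) : 0 < lowf m := by
  unfold lowf
  have h := @Nat.and_le_right m (m - 1)
  omega

-- for n ≠ 0, n & -n computes lowf of |n|
theorem band_neg_self (n : Int) (h : n ≠ 0) :
    PySem.Int.band n (-n) = ((lowf n.natAbs : Nat) : Int) := by
  unfold PySem.Int.band lowf
  rcases lt_trichotomy n 0 with hn | hn | hn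
  · have c1 : ¬ (0 : Int) ≤ n := by omega
    have c2 : (0 : Int) ≤ -n := by omega
    simp only [if_neg c1, if_pos c2]
    have e1 : (-n).toNat = n.natAbs := by omega
    have e2 : (-n - 1).toNat = n.natAbs - 1 := by omega
    rw [e1, e2]
  · exact absurd hn h
  · have c1 : (0 : Int) ≤ n := by omega
    have c2 : ¬ (0 : Int) ≤ -n := by omega
    simp only [if_pos c1, if_neg c2]
    have e1 : n.toNat = n.natAbs := by omega
    have e2 : (- -n - 1).toNat = n.natAbs - 1 := by omega
    rw [e1, e2]

theorem bitLength_two_mul (x : Nat) (hx : x ≠ 0) :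
    PySem.Int.bitLength ((2 * x : Nat) : Int) = PySem.Int.bitLength ((x : Nat) : Int) + 1 := by
  have h := PySem.Int.bitLength_natCast (m := 2 * x) (by omega)
  have e : (2 * x) / 2 = x := by omega
  rwa [e] at h

theorem loop_eq (n count : Int) :
    SetBitFromRightLoop n count =
      if n = 0 then 0
      else count + ((PySem.Int.bitLength (PySem.Int.band n (-n)) : Nat) : Int) := by
  induction n, count using SetBitFromRightLoop.induct with
  | case1 count => simp [SetBitFromRightLoop]
  | case2 n count h0 h1 =>
      rw [SetBitFromRightLoop, dif_neg h0, dif_pos h1, if_neg h0]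
      -- low bit is 1, so n is odd and n & -n = 1
      rw [PySem.Int.band_one] at h1
      have hdm := PySem.Int.floordiv_mul_add_mod n 2
      have hodd : ∃ k, n.natAbs = 2 * k + 1 := by
        refine ⟨(n.natAbs - 1) / 2, ?_⟩; omega
      obtain ⟨k, hk⟩ := hodd
      rw [band_neg_self n h0, hk, lowf_odd]
      norm_num [show PySem.Int.bitLength 1 = 1 from by decide]
  | case3 n count h0 h1 ih =>
      rw [SetBitFromRightLoop, dif_neg h0, dif_neg h1, ih, if_neg h0]
      -- low bit is 0, so n = 2*q with q ≠ 0
      rw [PySem.Int.band_one] at h1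
      have hm0 : 0 ≤ PySem.Int.mod n 2 := PySem.Int.mod_nonneg n (by norm_num)
      have hm2 : PySem.Int.mod n 2 < 2 := PySem.Int.mod_lt n (by norm_num)
      have hdm := PySem.Int.floordiv_mul_add_mod n 2
      have hsh : n >>> (1:Nat) = n / 2 := by rw [Int.shiftRight_eq_div_pow]; norm_num
      set q := n / 2 with hq
      have hn2 : n = 2 * q := by omega
      have hq0 : q ≠ 0 := by omega
      rw [hsh, if_neg hq0]
      have habs : n.natAbs = 2 * q.natAbs := by omega
      have hqa : q.natAbs ≠ 0 := by omega
      rw [band_neg_self n h0, band_neg_self q hq0, habs, lowf_even _ hqa,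
        bitLength_two_mul _ (lowf_pos q.natAbs hqa).ne']
      push_cast
      ring

-- ===== VERDICT (by name: the statement is the Claim_ definition above) =====
theorem SetBitFromRight_spec : Claim_equal_SetBitFromRight := by
  intro n _
  unfold Spec_SetBitFromRight SetBitFromRight SetBitFromRight_alt
  rw [loop_eq]
  by_cases h : n = 0
  · subst h; decide
  · rw [if_neg h]; ring
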